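-- pv_equiv track=rewrite | github.com/dsipakou/codewars | free_ur.py | get_free_urinals
-- ===== SOURCE A (Python) =====
-- def get_free_urinals(urinals):
--     free = True
--     output = 0
--     i = 0
--     while i < len(urinals) - 1:
--         if urinals[i] == "1":
--             free = False
--             if urinals[i + 1] == "1":
--                 return -1
--         else:
--             if free == True and urinals[i + 1] == "0":
--                 output += 1
--                 free = False
--             else:
--                 free = True
--         i += 1
--     return output + 1 if free and urinals[i] == "0" else output
-- ===== SOURCE B (Python) =====
-- def get_free_urinals(urinals):
--     if "11" in urinals:
--         return -1
--     # dynamic program over suffixes, right to left; free_val / busy_val = how many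
--     # people fit from this stall on, when the stall before it left this one usable /
--     # made it unusable (just seated someone, or is occupied)
--     free_val = 1 if urinals[-1] == "0" else 0
--     busy_val = 0
--     for i in reversed(range(len(urinals) - 1)):
--         if urinals[i] == "1":
--             free_val = busy_val
--         elif urinals[i + 1] == "0":
--             free_val, busy_val = 1 + busy_val, free_val
--         else:
--             busy_val = free_val
--     return free_val
-- ===== Notes on version B (the rewrite author's own statement) =====
-- stated objective: alternative
-- what changed: A simulates the seating greedily left to right with a mutable availability flag, a running counter and an early return -1; B first rules out adjacent occupied urinals with a substring test and then runs a dynamic program right to left over suffixes, carrying for each suffix the number of people that fit under the two possible states of the preceding stall.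
import Mathlib
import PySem

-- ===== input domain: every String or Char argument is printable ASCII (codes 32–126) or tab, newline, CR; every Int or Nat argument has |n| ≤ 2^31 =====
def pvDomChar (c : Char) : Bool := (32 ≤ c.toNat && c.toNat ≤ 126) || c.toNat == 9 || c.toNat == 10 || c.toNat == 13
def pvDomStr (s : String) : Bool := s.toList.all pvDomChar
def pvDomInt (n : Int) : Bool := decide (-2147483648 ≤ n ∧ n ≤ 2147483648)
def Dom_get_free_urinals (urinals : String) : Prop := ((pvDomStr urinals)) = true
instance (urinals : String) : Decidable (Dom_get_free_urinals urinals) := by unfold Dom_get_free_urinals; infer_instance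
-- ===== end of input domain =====

-- B replaces A's forward greedy scan (mutable flag + counter) by a right-to-left dynamic
-- program over suffixes carrying the two possible states of the preceding stall (objective:
-- alternative). Pre_ excludes only the empty string, on which both programs raise IndexError.


-- ===== PORT A =====
-- the while loop of A: index i, flag `free`, accumulator `output`; early return -1 on "11".
-- The loop runs while i < len - 1; the first argument counts the remaining iterations
-- (len - 1 - i), so the recursion is structural with i advancing exactly as in A.
-- Indexing uses List.getD: inside the loop i and i + 1 are always in range, and the final read
-- cs.getD i is in range exactly when the string is nonempty (empty input = Python IndexError,
-- excluded by Pre_), so this is exact on Pre_.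
def pvGoA (cs : List Char) : Nat → Nat → Bool → Int → Int
  | 0, i, free, output =>
    if free = true ∧ cs.getD i ' ' = '0' then output + 1 else output
  | fuel + 1, i, free, output =>
    if cs.getD i ' ' = '1' then
      if cs.getD (i + 1) ' ' = '1' then -1
      else pvGoA cs fuel (i + 1) false output
    else
      if free = true ∧ cs.getD (i + 1) ' ' = '0' then pvGoA cs fuel (i + 1) false (output + 1)
      else pvGoA cs fuel (i + 1) true output

def get_free_urinals (urinals : String) : Int :=
  pvGoA urinals.toList (urinals.toList.length - 1) 0 true 0

-- ===== PORT B =====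
-- Source B's loop body as a helper: the state is the pair (free_val, busy_val) of Source B, the step
-- is Source B's three branches at index i (i and i + 1 are always in range, so List.getD is exact).
def pvStepB (cs : List Char) (st : Int × Int) (i : Nat) : Int × Int :=
  if cs.getD i ' ' = '1' then (st.2, st.2)
  else if cs.getD (i + 1) ' ' = '0' then (1 + st.2, st.1)
  else (st.1, st.1)

-- Source B: "11" in urinals → -1; else free_val = 1 if urinals[-1] == "0" else 0, busy_val = 0,
-- one pass over reversed(range(len(urinals) - 1)) (= (List.range …).reverse) updating the
-- pair with pvStepB, returning free_val. urinals[-1] is PySem.Str/List pyGet? (none on the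
-- empty string = Python IndexError, excluded by Pre_).
def get_free_urinals_alt (urinals : String) : Int :=
  if PySem.Str.isIn "11" urinals then -1
  else
    let cs := urinals.toList
    let init : Int × Int := (if (PySem.List.pyGet? cs (-1)).getD ' ' = '0' then 1 else 0, 0)
    ((List.range (cs.length - 1)).reverse.foldl (pvStepB cs) init).1

-- ===== PRECONDITION & SPEC =====
-- Pre_ excludes only the empty string, on which A raises IndexError (it reads urinals[i]
-- after the loop) — and B raises IndexError too (it reads urinals[-1]).
def Pre_get_free_urinals (urinals : String) : Prop := urinals ≠ ""
instance (urinals : String) : Decidable (Pre_get_free_urinals urinals) := by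
  unfold Pre_get_free_urinals; infer_instance

def pvWitness_get_free_urinals : String := "0010"

def Spec_get_free_urinals (urinals : String) (out : Int) : Prop := out = get_free_urinals_alt urinals
instance (urinals : String) (out : Int) : Decidable (Spec_get_free_urinals urinals out) := by
  unfold Spec_get_free_urinals; infer_instance

-- ===== CLAIM (what is proved, stated in full; the proofs are below) =====
def Claim_equal_get_free_urinals : Prop := ∀ (urinals : String), Dom_get_free_urinals urinals → Pre_get_free_urinals urinals → Spec_get_free_urinals urinals (get_free_urinals urinals)

-- ===== LEMMAS AND PROOFS =====

-- structural rendering of A's scan: state (free, output) over the remaining suffix.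
def pvScanA : List Char → Bool → Int → Int
  | [], _, output => output
  | [c], free, output => if free = true ∧ c = '0' then output + 1 else output
  | c :: d :: rest, free, output =>
    if c = '1' then
      if d = '1' then -1 else pvScanA (d :: rest) false output
    else
      if free = true ∧ d = '0' then pvScanA (d :: rest) false (output + 1)
      else pvScanA (d :: rest) true output

theorem pvGoA_eq_scanA : ∀ (fuel : Nat) (cs : List Char) (i : Nat) (free : Bool) (out : Int),
    i + fuel = cs.length - 1 → i < cs.length →
    pvGoA cs fuel i free out = pvScanA (cs.drop i) free out := by
  intro fuel
  induction fuel with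
  | zero =>
    intro cs i free out hfe hlt
    have g1 : cs.getD i ' ' = cs[i] := List.getD_eq_getElem cs ' ' hlt
    have hd : cs.drop i = [cs[i]] := by
      rw [List.drop_eq_getElem_cons hlt]
      have : cs.drop (i + 1) = [] := by
        apply List.drop_eq_nil_of_le
        omega
      rw [this]
    rw [pvGoA, g1, hd]
    simp only [pvScanA]
  | succ fuel ih =>
    intro cs i free out hfe hlt
    have g1 : cs.getD i ' ' = cs[i] := List.getD_eq_getElem cs ' ' hlt
    have hi1 : i + 1 < cs.length := by omega
    have g2 : cs.getD (i + 1) ' ' = cs[i + 1] := List.getD_eq_getElem cs ' ' hi1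
    have hd : cs.drop i = cs[i] :: cs.drop (i + 1) := List.drop_eq_getElem_cons hlt
    have hd2 : cs.drop (i + 1) = cs[i + 1] :: cs.drop (i + 1 + 1) := List.drop_eq_getElem_cons hi1
    rw [pvGoA, g1, g2, hd, hd2]
    simp only [pvScanA]
    split_ifs with h1 h2 h3
    · rfl
    · rw [← hd2]
      exact ih cs (i + 1) false out (by omega) hi1
    · rw [← hd2]
      exact ih cs (i + 1) false (out + 1) (by omega) hi1
    · rw [← hd2]
      exact ih cs (i + 1) true out (by omega) hi1

theorem scanA_neg : ∀ (cs : List Char) (free : Bool) (out : Int),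
    ['1', '1'] <:+: cs → pvScanA cs free out = -1 := by
  intro cs
  induction cs with
  | nil =>
    intro free out h
    have := h.length_le
    simp at this
  | cons c rest ih =>
    intro free out h
    cases rest with
    | nil =>
      have := h.length_le
      simp at this
    | cons d rest' =>
      have hstep : ¬ (c = '1' ∧ d = '1') → ['1', '1'] <:+: (d :: rest') := by
        intro hnd
        rcases List.infix_cons_iff.mp h with hp | ht
        · rw [List.cons_prefix_cons] at hp
          obtain ⟨hc1, hp2⟩ := hp
          rw [List.cons_prefix_cons] at hp2
          exact absurd ⟨hc1.symm, hp2.1.symm⟩ hnd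
        · exact ht
      simp only [pvScanA]
      split_ifs with hc hd hfd
      · rfl
      · exact ih false out (hstep (fun hx => hd hx.2))
      · exact ih false (out + 1) (hstep (fun hx => hc hx.1))
      · exact ih true out (hstep (fun hx => hc hx.1))

-- the accumulator is additive as long as the scan never hits the early return -1
theorem scanA_add : ∀ (cs : List Char), ¬ (['1', '1'] <:+: cs) → ∀ (free : Bool) (out : Int),
    pvScanA cs free out = out + pvScanA cs free 0 := by
  intro cs
  induction cs with
  | nil =>
    intro _ free out
    simp [pvScanA]
  | cons c rest ih =>
    intro hinf free out
    cases rest with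
    | nil =>
      simp only [pvScanA]
      split_ifs <;> ring
    | cons d rest' =>
      have hrest : ¬ (['1', '1'] <:+: (d :: rest')) := fun hx =>
        hinf (hx.trans (List.suffix_cons c (d :: rest')).isInfix)
      have hnd : ¬ (c = '1' ∧ d = '1') := fun hx =>
        hinf ⟨[], rest', by simp [hx.1, hx.2]⟩
      simp only [pvScanA]
      split_ifs with hc hd hfd
      · exact absurd ⟨hc, hd⟩ hnd
      · exact ih hrest false out
      · rw [ih hrest false (out + 1), ih hrest false (0 + 1)]
        ring
      · exact ih hrest true out

-- one backward step of B computes the pair of suffix values of A's scan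
theorem stepB_suffix : ∀ (cs : List Char) (i : Nat), i + 1 < cs.length →
    ¬ (['1', '1'] <:+: cs) →
    pvStepB cs (pvScanA (cs.drop (i + 1)) true 0, pvScanA (cs.drop (i + 1)) false 0) i
      = (pvScanA (cs.drop i) true 0, pvScanA (cs.drop i) false 0) := by
  intro cs i hi1 hinf
  have hlt : i < cs.length := by omega
  have g1 : cs.getD i ' ' = cs[i] := List.getD_eq_getElem cs ' ' hlt
  have g2 : cs.getD (i + 1) ' ' = cs[i + 1] := List.getD_eq_getElem cs ' ' hi1
  have hd : cs.drop i = cs[i] :: cs.drop (i + 1) := List.drop_eq_getElem_cons hlt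
  have hd2 : cs.drop (i + 1) = cs[i + 1] :: cs.drop (i + 1 + 1) := List.drop_eq_getElem_cons hi1
  have hsub : ¬ (['1', '1'] <:+: cs.drop (i + 1)) := fun hx =>
    hinf (hx.trans (List.drop_suffix (i + 1) cs).isInfix)
  unfold pvStepB
  rw [g1, g2]
  by_cases hc : cs[i] = '1'
  · have hnd : cs[i + 1] ≠ '1' := by
      intro hdd
      apply hinf
      have hpre : ['1', '1'] <+: cs.drop i := by
        rw [hd, hd2, hc, hdd]
        exact ⟨cs.drop (i + 1 + 1), rfl⟩
      exact hpre.isInfix.trans (List.drop_suffix i cs).isInfix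
    rw [if_pos hc]
    rw [show pvScanA (cs.drop i) true 0 = pvScanA (cs.drop (i + 1)) false 0 from by
      rw [hd, hd2]; simp only [pvScanA]; rw [if_pos hc, if_neg hnd, ← hd2]]
    rw [show pvScanA (cs.drop i) false 0 = pvScanA (cs.drop (i + 1)) false 0 from by
      rw [hd, hd2]; simp only [pvScanA]; rw [if_pos hc, if_neg hnd, ← hd2]]
  · rw [if_neg hc]
    by_cases hd0 : cs[i + 1] = '0'
    · rw [if_pos hd0]
      rw [show pvScanA (cs.drop i) true 0 = 1 + pvScanA (cs.drop (i + 1)) false 0 from by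
        rw [hd, hd2]
        simp only [pvScanA]
        rw [if_neg hc, if_pos (⟨by simp, hd0⟩ : _ ∧ _), ← hd2]
        rw [scanA_add (cs.drop (i + 1)) hsub false (0 + 1)]
        ring]
      rw [show pvScanA (cs.drop i) false 0 = pvScanA (cs.drop (i + 1)) true 0 from by
        rw [hd, hd2]
        simp only [pvScanA]
        rw [if_neg hc, if_neg (by simp), ← hd2]]
    · rw [if_neg hd0]
      rw [show pvScanA (cs.drop i) true 0 = pvScanA (cs.drop (i + 1)) true 0 from by
        rw [hd, hd2]
        simp only [pvScanA]
        rw [if_neg hc, if_neg (by simp [hd0]), ← hd2]]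
      rw [show pvScanA (cs.drop i) false 0 = pvScanA (cs.drop (i + 1)) true 0 from by
        rw [hd, hd2]
        simp only [pvScanA]
        rw [if_neg hc, if_neg (by simp), ← hd2]]

-- folding B's step over the indices k-1, …, 0 turns the suffix-k pair into the whole-string pair
theorem foldB_suffix : ∀ (k : Nat) (cs : List Char), k ≤ cs.length - 1 →
    ¬ (['1', '1'] <:+: cs) →
    (List.range k).reverse.foldl (pvStepB cs)
        (pvScanA (cs.drop k) true 0, pvScanA (cs.drop k) false 0)
      = (pvScanA cs true 0, pvScanA cs false 0) := by
  intro k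
  induction k with
  | zero =>
    intro cs _ _
    simp
  | succ k ih =>
    intro cs hk hinf
    rw [List.range_succ, List.reverse_append]
    simp only [List.reverse_cons, List.reverse_nil, List.nil_append, List.singleton_append,
      List.foldl_cons]
    rw [stepB_suffix cs k (by omega) hinf]
    exact ih cs (by omega) hinf

-- ===== VERDICT (by name: the statement is the Claim_ definition above) =====
theorem get_free_urinals_spec : Claim_equal_get_free_urinals := by
  intro urinals _ hPre
  unfold Spec_get_free_urinals
  have hne : urinals ≠ "" := hPre
  have hcsne : urinals.toList ≠ [] := by
    simp [String.toList_eq_nil_iff, hne]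
  have hlen : 0 < urinals.toList.length := List.length_pos_iff.mpr hcsne
  have hA : get_free_urinals urinals = pvScanA urinals.toList true 0 := by
    unfold get_free_urinals
    have := pvGoA_eq_scanA (urinals.toList.length - 1) urinals.toList 0 true 0 (by omega) (by omega)
    simpa using this
  rw [hA]
  by_cases hinf : ['1', '1'] <:+: urinals.toList
  · rw [scanA_neg urinals.toList true 0 hinf]
    unfold get_free_urinals_alt
    rw [if_pos ((PySem.Str.isIn_iff_infix "11" urinals).mpr (by simpa using hinf))]
  · have hIn : ¬ (PySem.Str.isIn "11" urinals = true) := fun hh =>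
      hinf (by simpa using (PySem.Str.isIn_iff_infix "11" urinals).mp hh)
    unfold get_free_urinals_alt
    rw [if_neg hIn]
    simp only
    have hlast : (PySem.List.pyGet? urinals.toList (-1)).getD ' '
        = urinals.toList.getD (urinals.toList.length - 1) ' ' := by
      have h1 : 1 ≤ urinals.length := by
        rw [← String.length_toList]
        exact hlen
      simp [PySem.List.pyGet?, PySem.List.pyIdx?, List.getD, h1, String.length_toList]
    have hlt : urinals.toList.length - 1 < urinals.toList.length := by omega
    have g1 : urinals.toList.getD (urinals.toList.length - 1) ' '
        = urinals.toList[urinals.toList.length - 1] :=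
      List.getD_eq_getElem urinals.toList ' ' hlt
    have hdlast : urinals.toList.drop (urinals.toList.length - 1)
        = [urinals.toList[urinals.toList.length - 1]] := by
      rw [List.drop_eq_getElem_cons hlt]
      have : urinals.toList.drop (urinals.toList.length - 1 + 1) = [] := by
        apply List.drop_eq_nil_of_le
        omega
      rw [this]
    have hinit : ((if (PySem.List.pyGet? urinals.toList (-1)).getD ' ' = '0' then (1 : Int) else 0, (0 : Int)))
        = (pvScanA (urinals.toList.drop (urinals.toList.length - 1)) true 0,
           pvScanA (urinals.toList.drop (urinals.toList.length - 1)) false 0) := by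
      rw [hlast, g1, hdlast]
      simp only [pvScanA]
      split_ifs with h1 h2 h3 <;> simp_all
    rw [hinit, foldB_suffix (urinals.toList.length - 1) urinals.toList le_rfl hinf]
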